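-- pv_equiv track=rewrite | github.com/daem-uni/dagdim-lab-informatica | lab6/e6_b.py | roman_to_decimal
-- ===== SOURCE A (Python) =====
-- def value(char):
--     if char == "I":
--         return 1
--     elif char == "V":
--         return 5
--     elif char == "X":
--         return 10
--     elif char == "L":
--         return 50
--     elif char == "C":
--         return 100
--     elif char == "D":
--         return 500
--     elif char == "M":
--         return 1000
--
--     return 0
--
-- def roman_to_decimal(roman):
--     if len(roman) == "":
--         return 0
--
--     if len(roman) > 1 and value(roman[0]) < value(roman[1]):
--         if len(roman) == 2:
--             return value(roman[1]) - value(roman[0])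
--         else:
--             return value(roman[1]) - value(roman[0]) + roman_to_decimal(roman[2:])
--     else:
--         if len(roman) == 1:
--             return value(roman)
--         else:
--             return value(roman[0]) + roman_to_decimal(roman[1:])
-- ===== SOURCE B (Python) =====
-- def roman_to_decimal(roman):
--     vals = {"I": 1, "V": 5, "X": 10, "L": 50, "C": 100, "D": 500, "M": 1000}
--     total = 0
--     i = 0
--     n = len(roman)
--     while i < n:
--         v = vals.get(roman[i], 0)
--         if i + 1 < n and v < vals.get(roman[i + 1], 0):
--             total += vals.get(roman[i + 1], 0) - v
--             i += 2
--         else: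
--             total += v
--             i += 1
--     return total
-- ===== Notes on version B (the rewrite author's own statement) =====
-- stated objective: faster
-- what changed: Replaces A's recursion that copies an O(n) slice at every step by a single iterative indexed left-to-right pass with a value dictionary and an accumulator; Pre_ excludes only the empty string, on which A raises IndexError.
import Mathlib
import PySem

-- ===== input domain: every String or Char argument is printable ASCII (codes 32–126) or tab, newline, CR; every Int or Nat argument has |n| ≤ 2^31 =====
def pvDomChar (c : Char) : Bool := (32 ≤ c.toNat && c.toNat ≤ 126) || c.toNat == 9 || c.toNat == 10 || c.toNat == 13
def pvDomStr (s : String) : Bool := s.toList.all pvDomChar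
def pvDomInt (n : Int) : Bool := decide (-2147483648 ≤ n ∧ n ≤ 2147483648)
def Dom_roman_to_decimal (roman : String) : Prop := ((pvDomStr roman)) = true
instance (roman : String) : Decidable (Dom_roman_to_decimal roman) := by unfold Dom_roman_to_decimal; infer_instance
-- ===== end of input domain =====

-- B replaces A's recursion (which copies an O(n) slice at every step) by a single
-- iterative indexed left-to-right pass with a value dictionary and an accumulator.
-- Return-value equivalence only; A raises IndexError on the empty string (roman[0]), excluded by Pre_.

-- ===== PORT A =====
-- value(char)
def pvValue (c : Char) : Int :=
  if c = 'I' then 1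
  else if c = 'V' then 5
  else if c = 'X' then 10
  else if c = 'L' then 50
  else if c = 'C' then 100
  else if c = 'D' then 500
  else if c = 'M' then 1000
  else 0

-- value(roman) applied to the WHOLE string in A's len==1 branch
def pvValueS (s : String) : Int :=
  if s = "I" then 1
  else if s = "V" then 5
  else if s = "X" then 10
  else if s = "L" then 50
  else if s = "C" then 100
  else if s = "D" then 500
  else if s = "M" then 1000
  else 0

-- A's recursion over the character list; roman[2:] / roman[1:] are the list tails.
-- (A's first line 'if len(roman) == "": return 0' compares an int to a str and is
-- always False in Python 3; it is omitted. On [] A's Python raises IndexError —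
-- excluded by Pre_ — so the [] case here is unreachable under the claim.)
def pvGoA : List Char → Int
  | [] => 0
  | [c] => pvValueS (String.ofList [c])
  | a :: b :: rest =>
    if pvValue a < pvValue b then
      if rest = [] then pvValue b - pvValue a
      else pvValue b - pvValue a + pvGoA rest
    else pvValue a + pvGoA (b :: rest)

def roman_to_decimal (roman : String) : Int := pvGoA roman.toList

-- ===== PORT B =====
-- vals = {...}
def pvVals : PySem.Dict Char Int :=
  (((((((PySem.Dict.empty.insert 'I' 1).insert 'V' 5).insert 'X' 10).insert 'L' 50).insert
      'C' 100).insert 'D' 500).insert 'M' 1000)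

-- the while loop: i is the index, total the accumulator; roman[i] = l.getD i ' ' (i < n always)
def pvLoopB (l : List Char) (n i : Nat) (total : Int) : Int :=
  if _h : i < n then
    let v := pvVals.getD (l.getD i ' ') 0
    if i + 1 < n ∧ v < pvVals.getD (l.getD (i + 1) ' ') 0 then
      pvLoopB l n (i + 2) (total + (pvVals.getD (l.getD (i + 1) ' ') 0 - v))
    else
      pvLoopB l n (i + 1) (total + v)
  else total
termination_by n - i

def roman_to_decimal_alt (roman : String) : Int :=
  pvLoopB roman.toList roman.toList.length 0 0

-- ===== PRECONDITION & SPEC =====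
-- Pre_ excludes only the empty string, on which A raises IndexError.
def Pre_roman_to_decimal (roman : String) : Prop := roman ≠ ""
instance (roman : String) : Decidable (Pre_roman_to_decimal roman) := by
  unfold Pre_roman_to_decimal; infer_instance

def pvWitness_roman_to_decimal : String := "MCMXCIV"

def Spec_roman_to_decimal (roman : String) (out : Int) : Prop := out = roman_to_decimal_alt roman
instance (roman : String) (out : Int) : Decidable (Spec_roman_to_decimal roman out) := by unfold Spec_roman_to_decimal; infer_instance

-- ===== CLAIM (what is proved, stated in full; the proofs are below) =====
def Claim_equal_roman_to_decimal : Prop := ∀ (roman : String), Dom_roman_to_decimal roman → Pre_roman_to_decimal roman → Spec_roman_to_decimal roman (roman_to_decimal roman)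

-- ===== LEMMAS AND PROOFS =====

-- the dict lookup of B computes the same character value as A's if-chain
theorem pvVals_getD (c : Char) : pvVals.getD c 0 = pvValue c := by
  simp only [pvVals, pvValue, PySem.Dict.getD_insert, PySem.Dict.getD_empty]
  split_ifs <;> simp_all

theorem ofList_single_eq (c d : Char) : (String.ofList [c] = String.ofList [d]) ↔ c = d := by
  rw [String.ofList_inj]; simp

theorem pvValueS_single (c : Char) : pvValueS (String.ofList [c]) = pvValue c := by
  simp only [pvValueS, pvValue,
    show ("I":String) = String.ofList ['I'] from rfl, show ("V":String) = String.ofList ['V'] from rfl,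
    show ("X":String) = String.ofList ['X'] from rfl, show ("L":String) = String.ofList ['L'] from rfl,
    show ("C":String) = String.ofList ['C'] from rfl, show ("D":String) = String.ofList ['D'] from rfl,
    show ("M":String) = String.ofList ['M'] from rfl, ofList_single_eq]

-- loop invariant: B's loop from index i adds exactly A's value of the suffix l.drop i
theorem pvLoopB_eq_goA (l : List Char) : ∀ k i total, l.length - i ≤ k →
    pvLoopB l l.length i total = total + pvGoA (l.drop i) := by
  intro k
  induction k with
  | zero =>
    intro i total hk
    have hin : ¬ i < l.length := by omega
    rw [pvLoopB, dif_neg hin, List.drop_eq_nil_of_le (by omega), pvGoA]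
    ring
  | succ k ih =>
    intro i total hk
    by_cases hin : i < l.length
    · have hdrop : l.drop i = l[i] :: l.drop (i + 1) := List.drop_eq_getElem_cons hin
      have hgi : l[i]? = some l[i] := List.getElem?_eq_getElem hin
      rw [pvLoopB, dif_pos hin]
      by_cases h2 : i + 1 < l.length
      · have hdrop2 : l.drop (i + 1) = l[i + 1] :: l.drop (i + 2) :=
          List.drop_eq_getElem_cons h2
        have hgi2 : l[i + 1]? = some l[i + 1] := List.getElem?_eq_getElem h2
        simp only [List.getD, hgi, hgi2, Option.getD_some, pvVals_getD, h2, true_and]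
        by_cases hlt : pvValue l[i] < pvValue l[i + 1]
        · rw [if_pos hlt, ih (i + 2) _ (by omega), hdrop, hdrop2, pvGoA, if_pos hlt]
          by_cases hrest : l.drop (i + 2) = []
          · rw [if_pos hrest, hrest, pvGoA]; ring
          · rw [if_neg hrest]; ring
        · rw [if_neg hlt, ih (i + 1) _ (by omega), hdrop, hdrop2, pvGoA, if_neg hlt, ← hdrop2]
          ring
      · -- last character: the suffix is a singleton
        have hdrop2 : l.drop (i + 1) = [] := List.drop_eq_nil_of_le (by omega)
        simp only [List.getD, hgi, Option.getD_some, pvVals_getD, h2, false_and, if_false]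
        rw [ih (i + 1) _ (by omega), hdrop, hdrop2, pvGoA, pvGoA, pvValueS_single]
        ring
    · rw [pvLoopB, dif_neg hin, List.drop_eq_nil_of_le (by omega), pvGoA]
      ring

-- ===== VERDICT (by name: the statement is the Claim_ definition above) =====
theorem roman_to_decimal_spec : Claim_equal_roman_to_decimal := by
  intro roman _ _
  unfold Spec_roman_to_decimal roman_to_decimal roman_to_decimal_alt
  rw [pvLoopB_eq_goA roman.toList roman.toList.length 0 0 (by omega)]
  simp
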